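-- pv_equiv track=rewrite | github.com/IvanSpallaUgalde/Wordle-Python | Wordle.py | inWord
-- ===== SOURCE A (Python) =====
-- def inWord(respuesta, palabra, iteraton):
--     i = iteraton
--     letra = respuesta[i]
--
--     k = len(palabra)
--     if len(respuesta) < len(palabra):
--         k = len(respuesta)
--
--     if letraDup(letra, palabra):
--         return
--     else:
--         for m in range(k):
--             if palabra[m] == letra:
--                 return True
--         return False
--
-- def letraDup(letra, palabra):
--     count = 0
--     for i in range(len(palabra)):
--         if letra == palabra[i]:
--             count += 1
--
--     if count > 1:
--         return True
--
--     return False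
-- ===== SOURCE B (Python) =====
-- def inWord(respuesta, palabra, iteraton):
--     letra = respuesta[iteraton]
--     k = min(len(palabra), len(respuesta))
--     count = 0
--     found = False
--     for m, c in enumerate(palabra):
--         if c == letra:
--             count += 1
--             if m < k:
--                 found = True
--     if count > 1:
--         return None
--     return found
-- ===== Notes on version B (the rewrite author's own statement) =====
-- stated objective: simpler
-- what changed: Replaces the helper-call plus two separate scans (a full count loop in letraDup, then a first-k membership loop) with one inlined pass that maintains both a duplicate counter and a found flag.
import Mathlib
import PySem

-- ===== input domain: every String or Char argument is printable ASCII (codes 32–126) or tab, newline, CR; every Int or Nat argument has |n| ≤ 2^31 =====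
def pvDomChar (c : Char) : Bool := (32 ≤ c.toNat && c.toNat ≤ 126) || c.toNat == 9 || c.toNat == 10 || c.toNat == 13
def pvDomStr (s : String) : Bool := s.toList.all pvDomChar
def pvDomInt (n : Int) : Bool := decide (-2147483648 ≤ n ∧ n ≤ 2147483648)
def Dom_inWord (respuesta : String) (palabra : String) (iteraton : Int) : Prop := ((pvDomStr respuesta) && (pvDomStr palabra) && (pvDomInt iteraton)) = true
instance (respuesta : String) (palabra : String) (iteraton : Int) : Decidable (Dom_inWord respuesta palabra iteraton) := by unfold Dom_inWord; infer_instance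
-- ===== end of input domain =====

-- B inlines letraDup and fuses A's two scans into one pass with two accumulators; same cost, plainer shape.
-- ===== PORT A =====
-- 'for i in range(len(palabra)): if letra == palabra[i]: count += 1' — structural recursion over the chars with the count accumulator
def countLoopA (letra : Char) : List Char → Int → Int
  | [], count => count
  | c :: rest, count => countLoopA letra rest (if letra == c then count + 1 else count)

def letraDupA (letra : Char) (palabra : String) : Bool :=
  let count := countLoopA letra palabra.toList 0
  if count > 1 then true else false

-- 'for m in range(k): if palabra[m] == letra: return True / return False' — scan over the first k chars
def memLoopA (letra : Char) : List Char → Bool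
  | [] => false
  | c :: rest => if c == letra then true else memLoopA letra rest

def inWord (respuesta : String) (palabra : String) (iteraton : Int) : Option Bool :=
  match PySem.List.pyGet? respuesta.toList iteraton with  -- respuesta[iteraton]; none = IndexError, excluded by Pre_
  | none => none
  | some letra =>
    let k := if respuesta.toList.length < palabra.toList.length then respuesta.toList.length else palabra.toList.length
    if letraDupA letra palabra then none
    else some (memLoopA letra (palabra.toList.take k))

-- ===== PORT B =====
-- single pass with index m and state (count, found), as in Source B's enumerate loop
def altLoop (letra : Char) (k : Nat) : List Char → Nat → Int × Bool → Int × Bool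
  | [], _, st => st
  | c :: rest, m, (count, found) =>
      altLoop letra k rest (m + 1)
        (if c == letra then (count + 1, found || decide (m < k)) else (count, found))

def inWord_alt (respuesta : String) (palabra : String) (iteraton : Int) : Option Bool :=
  match PySem.List.pyGet? respuesta.toList iteraton with
  | none => none
  | some letra =>
    let k := min palabra.toList.length respuesta.toList.length
    let st := altLoop letra k palabra.toList 0 (0, false)
    if st.1 > 1 then none else some st.2

-- ===== PRECONDITION & SPEC =====
-- Pre_ excludes exactly the inputs where respuesta[iteraton] raises IndexError in both Pythons.
def Pre_inWord (respuesta : String) (palabra : String) (iteraton : Int) : Prop :=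
  PySem.Raise.InRange respuesta.toList.length iteraton
instance (respuesta : String) (palabra : String) (iteraton : Int) : Decidable (Pre_inWord respuesta palabra iteraton) := by unfold Pre_inWord; infer_instance

def pvWitness_inWord : String × String × Int := ("table", "cable", 2)

def Spec_inWord (respuesta : String) (palabra : String) (iteraton : Int) (out : Option Bool) : Prop := out = inWord_alt respuesta palabra iteraton
instance (respuesta : String) (palabra : String) (iteraton : Int) (out : Option Bool) : Decidable (Spec_inWord respuesta palabra iteraton out) := by unfold Spec_inWord; infer_instance

-- ===== CLAIM (what is proved, stated in full; the proofs are below) =====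
def Claim_equal_inWord : Prop := ∀ (respuesta : String) (palabra : String) (iteraton : Int), Dom_inWord respuesta palabra iteraton → Pre_inWord respuesta palabra iteraton → Spec_inWord respuesta palabra iteraton (inWord respuesta palabra iteraton)

-- ===== LEMMAS AND PROOFS =====

-- B's fused loop computes A's count and A's first-k membership in one pass
lemma altLoop_eq (letra : Char) (k : Nat) (cs : List Char) :
    ∀ (m : Nat) (count : Int) (found : Bool),
      altLoop letra k cs m (count, found) =
        (countLoopA letra cs count, found || memLoopA letra (cs.take (k - m))) := by
  induction cs with
  | nil => intro m count found; simp [altLoop, countLoopA, memLoopA]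
  | cons c rest ih =>
    intro m count found
    by_cases hm : m < k
    · obtain ⟨j, hj⟩ : ∃ j, k - m = j + 1 := ⟨k - m - 1, by omega⟩
      have hj' : k - (m + 1) = j := by omega
      by_cases hc : c = letra
      · simp [altLoop, countLoopA, memLoopA, hc, hm, ih, hj, hj']
      · have hc' : ¬ letra = c := fun h => hc h.symm
        simp [altLoop, countLoopA, memLoopA, hc, hc', ih, hj, hj']
    · have h0 : k - m = 0 := by omega
      have h1 : k - (m + 1) = 0 := by omega
      by_cases hc : c = letra
      · simp [altLoop, countLoopA, memLoopA, hc, hm, ih, h0, h1]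
      · have hc' : ¬ letra = c := fun h => hc h.symm
        simp [altLoop, countLoopA, memLoopA, hc, hc', ih, h0, h1]

-- ===== VERDICT (by name: the statement is the Claim_ definition above) =====
theorem inWord_spec : Claim_equal_inWord := by
  intro respuesta palabra iteraton _ hpre
  unfold Spec_inWord inWord inWord_alt
  cases hget : PySem.List.pyGet? respuesta.toList iteraton with
  | none => rfl
  | some letra =>
    simp only []
    rw [altLoop_eq]
    have hk : (if respuesta.toList.length < palabra.toList.length then respuesta.toList.length
               else palabra.toList.length) = min palabra.toList.length respuesta.toList.length := by
      split_ifs <;> omega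
    simp only [letraDupA, hk, Nat.sub_zero, Bool.false_or]
    split_ifs with h1 <;> simp_all
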